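-- pv_equiv track=rewrite | github.com/bfor2000/Du-an-ca-nhan | Thiet ke bo thi nghiem khuech dai thuat toan/PC/Main_GUI/new/run.py | find_Com
-- ===== SOURCE A (Python) =====
-- def find_Com(portsFound,Drive):
--     commPort = 'None'
--     numConnection = len(portsFound)
--     for i in range(0,numConnection):
--         port = portsFound[i]
--         strPort = str(port)
--         if Drive in strPort:
--             splitPort = strPort.split(' ')
--             commPort = (splitPort[0])
--     return commPort
-- ===== SOURCE B (Python) =====
-- def find_Com(portsFound, Drive):
--     for port in reversed(portsFound):
--         strPort = str(port)
--         if Drive in strPort: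
--             return strPort.split(' ')[0]
--     return 'None'
-- ===== Notes on version B (the rewrite author's own statement) =====
-- stated objective: alternative
-- what changed: Replaces the forward index loop that overwrites an accumulator with a reverse traversal that returns at the first match (the last forward match), dropping the accumulator entirely.
import Mathlib
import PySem

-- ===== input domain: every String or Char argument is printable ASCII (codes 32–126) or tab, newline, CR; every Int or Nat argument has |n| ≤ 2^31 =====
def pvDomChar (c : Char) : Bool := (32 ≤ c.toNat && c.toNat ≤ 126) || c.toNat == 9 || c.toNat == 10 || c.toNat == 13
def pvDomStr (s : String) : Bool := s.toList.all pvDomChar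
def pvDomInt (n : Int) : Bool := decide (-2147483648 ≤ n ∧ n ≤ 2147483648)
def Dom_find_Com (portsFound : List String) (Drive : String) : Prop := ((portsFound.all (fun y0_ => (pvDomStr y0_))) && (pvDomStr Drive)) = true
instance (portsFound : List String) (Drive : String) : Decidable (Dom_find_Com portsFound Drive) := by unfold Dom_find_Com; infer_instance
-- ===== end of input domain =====

-- B replaces A's forward scan-and-overwrite accumulator with a reverse scan that
-- returns the first (i.e. last forward) match; alternative decomposition, same cost.


-- ===== PORT A =====
-- first word of a port string: strPort.split(' ')[0] (split(' ') is never empty, so [0] never raises; the "" defaults are unreachable)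
def pvFirstWord (strPort : String) : String :=
  (((PySem.Str.split? strPort " ").getD []).headD "")

-- literal port of A: iterate the ports in order, overwriting commPort on each match
def find_Com (portsFound : List String) (Drive : String) : String :=
  portsFound.foldl
    (fun commPort port =>
      if PySem.Str.isIn Drive port then pvFirstWord port else commPort)
    "None"

-- ===== PORT B =====
-- literal port of B: scan reversed(portsFound), return at the first match, else 'None'
def pvFindRev (Drive : String) : List String → String
  | [] => "None"
  | port :: rest =>
    if PySem.Str.isIn Drive port then pvFirstWord port else pvFindRev Drive rest

def find_Com_alt (portsFound : List String) (Drive : String) : String :=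
  pvFindRev Drive portsFound.reverse

-- ===== PRECONDITION & SPEC =====
def Spec_find_Com (portsFound : List String) (Drive : String) (out : String) : Prop := out = find_Com_alt portsFound Drive
instance (portsFound : List String) (Drive : String) (out : String) : Decidable (Spec_find_Com portsFound Drive out) := by unfold Spec_find_Com; infer_instance

-- ===== CLAIM (what is proved, stated in full; the proofs are below) =====
def Claim_equal_find_Com : Prop := ∀ (portsFound : List String) (Drive : String), Dom_find_Com portsFound Drive → Spec_find_Com portsFound Drive (find_Com portsFound Drive)

-- ===== LEMMAS AND PROOFS =====

-- A's loop step, named for the proofs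
def pvStep (Drive commPort port : String) : String :=
  if PySem.Str.isIn Drive port then pvFirstWord port else commPort

-- pvFindRev with a general fallback instead of the literal "None"
def pvAux (Drive acc : String) : List String → String
  | [] => acc
  | port :: rest =>
    if PySem.Str.isIn Drive port then pvFirstWord port else pvAux Drive acc rest

lemma pvAux_none (Drive : String) (l : List String) :
    pvAux Drive "None" l = pvFindRev Drive l := by
  induction l with
  | nil => rfl
  | cons p r ih => simp [pvAux, pvFindRev, ih]

lemma pvAux_snoc (Drive acc a : String) (xs : List String) :
    pvAux Drive acc (xs ++ [a]) = pvAux Drive (pvStep Drive acc a) xs := by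
  induction xs with
  | nil => simp [pvAux, pvStep]
  | cons x r ih => simp [pvAux, ih]

lemma pv_foldl_eq_aux (Drive : String) (l : List String) (acc : String) :
    l.foldl (pvStep Drive) acc = pvAux Drive acc l.reverse := by
  induction l generalizing acc with
  | nil => rfl
  | cons a r ih =>
    simp only [List.foldl_cons, List.reverse_cons, pvAux_snoc]
    exact ih _

-- ===== VERDICT (by name: the statement is the Claim_ definition above) =====
theorem find_Com_spec : Claim_equal_find_Com := by
  intro portsFound Drive _
  show find_Com portsFound Drive = find_Com_alt portsFound Drive
  unfold find_Com find_Com_alt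
  rw [show (fun commPort port => if PySem.Str.isIn Drive port then pvFirstWord port else commPort) = pvStep Drive from rfl,
    pv_foldl_eq_aux, pvAux_none]
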